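-- pv_equiv track=rewrite | github.com/Jo-Chang/BaekjoonHub | 백준/Bronze/9455. 박스/박스.py | get_move_box_num
-- ===== SOURCE A (Python) =====
-- def get_move_box_num(lst2_):
--     ans = 0
--     y_len = len(lst2_)
--     x_len = len(lst2_[0])
--     for i in range(x_len):
--         cnt = 0
--         for j in range(y_len-1, -1, -1):
--             if lst2_[j][i] == 1:
--                 ans += (y_len - 1 - cnt) - j
--                 cnt += 1
--
--     return ans
-- ===== SOURCE B (Python) =====
-- def get_move_box_num(lst2_):
--     y_len = len(lst2_)
--     width = len(lst2_[0])
--     stats = [(0, 0)] * width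
--     for j, row in enumerate(lst2_):
--         stats = [(c + 1, s + j) if row[i] == 1 else (c, s)
--                  for i, (c, s) in enumerate(stats)]
--     return sum(c * (y_len - 1) - c * (c - 1) // 2 - s for c, s in stats)
-- ===== Notes on version B (the rewrite author's own statement) =====
-- stated objective: alternative
-- what changed: Replaces A's column-major bottom-up drop simulation (running cnt, one distance added per box) with a row-major pass maintaining a per-column (count, row-index-sum) table, finished by the closed-form triangular-number expression count*(y_len-1) - count*(count-1)//2 - sum_rows per column.
import Mathlib
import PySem

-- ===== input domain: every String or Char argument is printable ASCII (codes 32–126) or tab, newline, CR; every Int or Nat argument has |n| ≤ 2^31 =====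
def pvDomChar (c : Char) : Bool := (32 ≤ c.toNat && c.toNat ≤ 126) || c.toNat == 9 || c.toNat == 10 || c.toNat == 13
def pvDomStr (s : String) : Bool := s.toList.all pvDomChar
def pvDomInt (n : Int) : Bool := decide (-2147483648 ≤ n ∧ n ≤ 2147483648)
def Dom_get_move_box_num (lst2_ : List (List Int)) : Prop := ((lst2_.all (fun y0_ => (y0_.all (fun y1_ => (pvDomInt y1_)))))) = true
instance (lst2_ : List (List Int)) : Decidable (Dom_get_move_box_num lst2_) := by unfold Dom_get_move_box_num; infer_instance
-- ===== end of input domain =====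

-- B replaces A's column-major bottom-up drop simulation by a row-major pass building a
-- per-column (count, row-sum) table plus a closed-form triangular-number finish; objective: alternative.

-- ===== PORT A =====
-- indexing uses pyGetD: under Pre_ every access is in range (Python raises outside Pre_)
def get_move_box_num (lst2_ : List (List Int)) : Int :=
  let y_len : Int := (lst2_.length : Int)
  let x_len : Int := (((PySem.List.pyGet? lst2_ 0).getD []).length : Int)
  (PySem.List.pyRange 0 x_len 1).foldl (fun ans i =>
    ((PySem.List.pyRange (y_len - 1) (-1) (-1)).foldl (fun (p : Int × Int) j =>
      if PySem.List.pyGetD (PySem.List.pyGetD lst2_ j []) i 0 == 1 then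
        (p.1 + (y_len - 1 - p.2) - j, p.2 + 1)
      else p) (ans, 0)).1) 0

-- ===== PORT B =====
def get_move_box_num_alt (lst2_ : List (List Int)) : Int :=
  let y_len : Int := (lst2_.length : Int)
  let width : Nat := ((PySem.List.pyGet? lst2_ 0).getD []).length
  let stats : List (Int × Int) :=
    (PySem.List.enumerate lst2_).foldl (fun stats jr =>
      (PySem.List.enumerate stats).map (fun ip =>
        if PySem.List.pyGetD jr.2 ip.1 0 == 1 then (ip.2.1 + 1, ip.2.2 + jr.1) else ip.2))
      (List.replicate width ((0 : Int), (0 : Int)))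
  (stats.map (fun p =>
    p.1 * (y_len - 1) - PySem.Int.floordiv (p.1 * (p.1 - 1)) 2 - p.2)).sum

-- ===== PRECONDITION & SPEC =====
-- Pre_ excludes exactly the inputs on which Python A raises IndexError:
-- the empty list (lst2_[0]) and rows shorter than the first row (lst2_[j][i]).
def Pre_get_move_box_num (lst2_ : List (List Int)) : Prop :=
  lst2_ ≠ [] ∧ ∀ row ∈ lst2_, (lst2_.headD []).length ≤ row.length
instance (lst2_ : List (List Int)) : Decidable (Pre_get_move_box_num lst2_) := by
  unfold Pre_get_move_box_num; infer_instance
def pvWitness_get_move_box_num : List (List Int) := [[1, 0], [0, 0], [1, 1]]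

def Spec_get_move_box_num (lst2_ : List (List Int)) (out : Int) : Prop := out = get_move_box_num_alt lst2_
instance (lst2_ : List (List Int)) (out : Int) : Decidable (Spec_get_move_box_num lst2_ out) := by unfold Spec_get_move_box_num; infer_instance

-- ===== CLAIM (what is proved, stated in full; the proofs are below) =====
def Claim_equal_get_move_box_num : Prop := ∀ (lst2_ : List (List Int)), Dom_get_move_box_num lst2_ → Pre_get_move_box_num lst2_ → Spec_get_move_box_num lst2_ (get_move_box_num lst2_)

-- ===== LEMMAS AND PROOFS =====

-- count of ones and sum of row indices of ones among rows 0..n-1 of column i (index form, for A)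
def pvCnt (g : Int → Int) : Nat → Int
  | 0 => 0
  | n + 1 => pvCnt g n + (if g n == 1 then 1 else 0)

def pvSum (g : Int → Int) : Nat → Int
  | 0 => 0
  | n + 1 => pvSum g n + (if g n == 1 then (n : Int) else 0)

def pvTri (m : Int) : Int := PySem.Int.floordiv (m * (m - 1)) 2

-- the same two quantities in structural (list) form, for B
def pvCntL (i : Int) (rows : List (List Int)) : Int :=
  (rows.map (fun r => if PySem.List.pyGetD r i 0 == 1 then (1 : Int) else 0)).sum

def pvSumL (i : Int) (j0 : Int) : List (List Int) → Int
  | [] => 0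
  | r :: rs => (if PySem.List.pyGetD r i 0 == 1 then j0 else 0) + pvSumL i (j0 + 1) rs

theorem pvCnt_nonneg (g : Int → Int) (n : Nat) : 0 ≤ pvCnt g n := by
  induction n with
  | zero => simp [pvCnt]
  | succ n ih => unfold pvCnt; split <;> omega

theorem pvTri_succ (m : Int) (_hm : 0 ≤ m) : pvTri (m + 1) = pvTri m + m := by
  unfold pvTri
  rw [PySem.Int.floordiv_eq_ediv_of_pos (by norm_num), PySem.Int.floordiv_eq_ediv_of_pos (by norm_num)]
  obtain ⟨k, hk⟩ : Even (m * (m - 1)) := by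
    have := Int.even_mul_succ_self (m - 1)
    simpa [mul_comm] using this
  have hq : (m + 1) * (m + 1 - 1) = m * (m - 1) + 2 * m := by ring
  omega

-- ===== A side: the bottom-up inner loop computes (cnt, sum) with a triangular correction =====
theorem pvLoopA (g : Int → Int) (Y : Int) (n : Nat) (a0 c0 : Int) (hc : 0 ≤ c0) :
    ((PySem.List.pyRange 0 (n : Int) 1).reverse).foldl (fun (p : Int × Int) j =>
      if g j == 1 then (p.1 + (Y - 1 - p.2) - j, p.2 + 1) else p) (a0, c0)
    = (a0 + pvCnt g n * (Y - 1 - c0) - pvTri (pvCnt g n) - pvSum g n, c0 + pvCnt g n) := by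
  induction n generalizing a0 c0 with
  | zero => simp [PySem.List.pyRange_one_eq_nil, pvCnt, pvSum, pvTri, PySem.Int.floordiv]
  | succ n ih =>
    rw [show ((↑(n + 1) : Int)) = (n : Int) + 1 by omega,
        PySem.List.pyRange_one_succ_right (by positivity), List.reverse_append]
    simp only [List.reverse_singleton, List.singleton_append, List.foldl_cons]
    by_cases h : g n == 1
    · rw [if_pos h, ih _ _ (by omega)]
      have hC := pvCnt_nonneg g n
      have ht := pvTri_succ (pvCnt g n) hC
      simp only [pvCnt, pvSum, h, if_pos, Prod.mk.injEq]
      refine ⟨?_, by ring⟩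
      rw [ht]; ring
    · rw [if_neg h, ih _ _ hc]
      simp only [pvCnt, pvSum, h, Bool.false_eq_true, ite_false, Prod.mk.injEq]
      constructor <;> ring_nf

-- pvCnt/pvSum only read g below n
theorem pvCnt_congr (g g' : Int → Int) (n : Nat) (h : ∀ k : Nat, k < n → g k = g' k) :
    pvCnt g n = pvCnt g' n := by
  induction n with
  | zero => rfl
  | succ n ih => simp only [pvCnt, ih (fun k hk => h k (by omega)), h n (by omega)]

theorem pvSum_congr (g g' : Int → Int) (n : Nat) (h : ∀ k : Nat, k < n → g k = g' k) :
    pvSum g n = pvSum g' n := by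
  induction n with
  | zero => rfl
  | succ n ih => simp only [pvSum, ih (fun k hk => h k (by omega)), h n (by omega)]

theorem pvSumL_append (i j0 : Int) (rows : List (List Int)) (r : List Int) :
    pvSumL i j0 (rows ++ [r])
    = pvSumL i j0 rows + (if PySem.List.pyGetD r i 0 == 1 then j0 + rows.length else 0) := by
  induction rows generalizing j0 with
  | nil => simp [pvSumL]
  | cons a as ih =>
    simp only [List.cons_append, pvSumL, ih (j0 + 1), List.length_cons]
    push_cast
    ring_nf

-- bridge: the index-form quantities over all rows equal the list-form ones
theorem pvCnt_bridge (i : Int) (rows : List (List Int)) :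
    pvCnt (fun j => PySem.List.pyGetD (PySem.List.pyGetD rows j []) i 0) rows.length
    = pvCntL i rows := by
  induction rows using List.reverseRecOn with
  | nil => rfl
  | append_singleton rows r ih =>
    rw [List.length_append, List.length_singleton]
    unfold pvCnt
    rw [pvCnt_congr _ (fun j => PySem.List.pyGetD (PySem.List.pyGetD rows j []) i 0) _
        (fun k hk => by
          simp only [PySem.List.pyGetD_natCast, List.getD_eq_getElem?_getD,
            List.getElem?_append_left hk]),
      ih]
    simp [pvCntL, PySem.List.pyGetD_natCast, List.getD_eq_getElem?_getD]

theorem pvSum_bridge (i : Int) (rows : List (List Int)) :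
    pvSum (fun j => PySem.List.pyGetD (PySem.List.pyGetD rows j []) i 0) rows.length
    = pvSumL i 0 rows := by
  induction rows using List.reverseRecOn with
  | nil => rfl
  | append_singleton rows r ih =>
    rw [List.length_append, List.length_singleton]
    unfold pvSum
    rw [pvSum_congr _ (fun j => PySem.List.pyGetD (PySem.List.pyGetD rows j []) i 0) _
        (fun k hk => by
          simp only [PySem.List.pyGetD_natCast, List.getD_eq_getElem?_getD,
            List.getElem?_append_left hk]),
      ih, pvSumL_append]
    simp [PySem.List.pyGetD_natCast, List.getD_eq_getElem?_getD]

-- ===== B side: the row-major fold maintains the per-column (count, row-sum) table =====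
theorem pvStepB (n : Nat) (f : Int → Int × Int) (j : Int) (r : List Int) :
    (PySem.List.enumerate ((PySem.List.pyRange 0 (n : Int) 1).map f)).map (fun ip =>
      if PySem.List.pyGetD r ip.1 0 == 1 then (ip.2.1 + 1, ip.2.2 + j) else ip.2)
    = (PySem.List.pyRange 0 (n : Int) 1).map (fun i =>
        if PySem.List.pyGetD r i 0 == 1 then ((f i).1 + 1, (f i).2 + j) else f i) := by
  rw [PySem.List.enumerate_eq_map_pyRange _ ((0 : Int), (0 : Int)), List.map_map]
  simp only [PySem.List.len_eq, List.length_map, PySem.List.length_pyRange_one]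
  rw [show (((n : Int) - 0).toNat : Int) = (n : Int) by omega]
  apply List.map_congr_left
  intro x hx
  obtain ⟨hx0, hxn⟩ := PySem.List.mem_pyRange_one.1 hx
  simp only [Function.comp_apply,
    PySem.List.pyGetD_map_pyRange_of_nonneg f (n : Int) x _ (by omega) (by omega)]

theorem pvFoldB (rows : List (List Int)) (n : Nat) :
    ∀ (j0 : Int) (f : Int → Int × Int),
    (PySem.List.enumerate rows j0).foldl (fun stats jr =>
      (PySem.List.enumerate stats).map (fun ip =>
        if PySem.List.pyGetD jr.2 ip.1 0 == 1 then (ip.2.1 + 1, ip.2.2 + jr.1) else ip.2))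
      ((PySem.List.pyRange 0 (n : Int) 1).map f)
    = (PySem.List.pyRange 0 (n : Int) 1).map (fun i =>
        ((f i).1 + pvCntL i rows, (f i).2 + pvSumL i j0 rows)) := by
  induction rows with
  | nil =>
    intro j0 f
    simp [PySem.List.enumerate_nil, pvCntL, pvSumL]
  | cons r rs ih =>
    intro j0 f
    rw [PySem.List.enumerate_cons, List.foldl_cons, pvStepB n f j0 r, ih (j0 + 1)]
    apply List.map_congr_left
    intro x _
    simp only [pvCntL, pvSumL, List.map_cons, List.sum_cons]
    by_cases h : PySem.List.pyGetD r x 0 == 1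
    · simp only [h, if_pos, Prod.mk.injEq]; constructor <;> ring
    · simp only [h, Bool.false_eq_true, ite_false, Prod.mk.injEq]
      constructor <;> ring

-- ===== VERDICT (by name: the statement is the Claim_ definition above) =====
theorem get_move_box_num_spec : Claim_equal_get_move_box_num := by
  intro lst2_ _ _
  simp only [Spec_get_move_box_num, get_move_box_num, get_move_box_num_alt]
  set Y : Int := (lst2_.length : Int) with hY
  set w : Nat := ((PySem.List.pyGet? lst2_ 0).getD []).length with hw
  -- B: replicate = map of the constant function over the range, then the fold invariant
  rw [show (List.replicate w ((0 : Int), (0 : Int)))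
        = (PySem.List.pyRange 0 (w : Int) 1).map (fun _ => ((0 : Int), (0 : Int))) by
      rw [List.map_const', PySem.List.length_pyRange_one]
      congr 1]
  rw [pvFoldB lst2_ w 0 (fun _ => ((0 : Int), (0 : Int))), List.map_map]
  -- A: each column via the bottom-up loop lemma, then sum the columns
  have hArange : PySem.List.pyRange (Y - 1) (-1) (-1) = (PySem.List.pyRange 0 Y 1).reverse := by
    rw [PySem.List.pyRange_neg_one_eq_reverse]; norm_num
  rw [PySem.List.foldl_congr_mem _ _
      (fun ans (i : Int) => ans + (pvCntL i lst2_ * (Y - 1) - pvTri (pvCntL i lst2_)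
        - pvSumL i 0 lst2_)) 0
      (by
        intro ans i _
        rw [hArange, hY,
          pvLoopA (fun j => PySem.List.pyGetD (PySem.List.pyGetD lst2_ j []) i 0)
            Y lst2_.length ans 0 le_rfl,
          pvCnt_bridge i lst2_, pvSum_bridge i lst2_]
        dsimp only
        rw [hY]
        ring),
    PySem.List.foldl_add]
  simp [Function.comp_def, pvTri, hY]
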